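-- pv_equiv track=rewrite | github.com/Adrian6303/tema_lab_13 | main.py | back_prime_nr_sum_i
-- ===== SOURCE A (Python) =====
-- def is_prime(num):
--     if num < 2:
--         return False
--     for i in range(2, num):
--         if num % i == 0:
--             return False
--     return True
--
-- def back_prime_nr_sum_i(n):
--     prime_numbers = [x for x in range(2, n + 1) if is_prime(x)]
--     result = []
--     stack = [(0, [], 0)]
--     while stack:
--         total, factors, start = stack.pop()
--         if total == n:
--             result.append(factors[:])
--             continue
--         for i in range(start, len(prime_numbers)):
--             if total + prime_numbers[i] > n:
--                 break
--             stack.append((total + prime_numbers[i], factors + [prime_numbers[i]], i))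
--     result.sort(key=lambda x: sorted(x))
--     return result
-- ===== SOURCE B (Python) =====
-- def is_prime(num):
--     if num < 2:
--         return False
--     for i in range(2, num):
--         if num % i == 0:
--             return False
--     return True
--
-- def back_prime_nr_sum_i(n):
--     primes = [x for x in range(2, n + 1) if is_prime(x)]
--     result = []
--     def rec(total, avail, factors):
--         if total == n:
--             result.append(factors)
--             return
--         for i, p in enumerate(avail):
--             if total + p > n:
--                 break
--             rec(total + p, avail[i:], factors + [p])
--     rec(0, primes, [])
--     result.sort(key=lambda x: sorted(x))
--     return result
-- ===== Notes on version B (the rewrite author's own statement) =====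
-- stated objective: alternative
-- what changed: Replaced A's explicit LIFO stack machine (tuples of pending states pushed/popped on a worklist) by direct recursive backtracking on suffixes of the prime list, using the call stack instead of the explicit stack; the final key-sort is kept.
import Mathlib
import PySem

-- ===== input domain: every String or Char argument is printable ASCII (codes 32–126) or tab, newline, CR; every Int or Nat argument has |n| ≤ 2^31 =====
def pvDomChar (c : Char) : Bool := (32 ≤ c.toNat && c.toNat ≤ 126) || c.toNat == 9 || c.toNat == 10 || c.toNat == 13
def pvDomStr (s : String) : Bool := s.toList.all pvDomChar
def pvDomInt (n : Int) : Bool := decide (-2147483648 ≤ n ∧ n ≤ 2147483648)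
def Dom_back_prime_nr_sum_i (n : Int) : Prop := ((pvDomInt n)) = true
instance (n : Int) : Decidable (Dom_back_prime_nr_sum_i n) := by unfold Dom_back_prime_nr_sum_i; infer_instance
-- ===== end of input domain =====

-- B replaces A's explicit LIFO stack machine by direct recursive backtracking over
-- suffixes of the prime list (same results, plainer decomposition); return values proved equal.

-- ===== PORT A =====
-- is_prime (identical helper in both Pythons)
def isPrime (num : Int) : Bool :=
  if num < 2 then false
  else (PySem.List.pyRange 2 num).all (fun i => !(PySem.Int.mod num i == 0))

-- prime_numbers = [x for x in range(2, n + 1) if is_prime(x)]  (identical line in A and B)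
def pvPrimes (n : Int) : List Int :=
  (PySem.List.pyRange 2 (n + 1)).filter (fun x => isPrime x)

-- A's inner 'for i in range(start, len(prime_numbers))' push loop, with its break
def pushA (n : Int) (primes : List Int) (total : Int) (factors : List Int) :
    List Int → List (Int × List Int × Int) → List (Int × List Int × Int)
  | [], stack => stack
  | i :: rest, stack =>
    let p := PySem.List.pyGetD primes i 0
    if n < total + p then stack
    else pushA n primes total factors rest (stack ++ [(total + p, factors ++ [p], i)])

-- A's 'while stack' loop, popping from the end; the Nat fuel is only a totality
-- guard (the fuel passed by back_prime_nr_sum_i is proved sufficient below)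
def loopA (n : Int) (primes : List Int) :
    Nat → List (Int × List Int × Int) → List (List Int) → List (List Int)
  | 0, _, result => result
  | fuel + 1, stack, result =>
    match stack.getLast? with
    | none => result
    | some (total, factors, start) =>
      if total = n then loopA n primes fuel stack.dropLast (result ++ [factors])
      else loopA n primes fuel
        (pushA n primes total factors
          (PySem.List.pyRange start (primes.length : Int)) stack.dropLast) result

def back_prime_nr_sum_i (n : Int) : List (List Int) :=
  let primes := pvPrimes n
  let result := loopA n primes ((primes.length + 1) ^ n.toNat) [(0, [], 0)] []
  PySem.List.sorted result (fun x => PySem.List.sorted x (fun y => y))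

-- ===== PORT B =====
-- rec(total, avail, factors) of Source B; the Nat fuel is only a totality guard
-- (the fuel passed by back_prime_nr_sum_i_alt is proved sufficient below)
mutual
def goB (n : Int) (fuel : Nat) (total : Int) (avail factors : List Int) :
    List (List Int) :=
  match fuel with
  | 0 => []
  | f + 1 => if total = n then [factors] else goLoop n f total avail factors
termination_by (fuel, 0)

-- the 'for i, p in enumerate(avail)' loop of rec, with its break
def goLoop (n : Int) (fuel : Nat) (total : Int) (avail factors : List Int) :
    List (List Int) :=
  match avail with
  | [] => []
  | p :: rest =>
    if n < total + p then []
    else goB n fuel (total + p) (p :: rest) (factors ++ [p]) ++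
         goLoop n fuel total rest factors
termination_by (fuel, avail.length + 1)
end

def back_prime_nr_sum_i_alt (n : Int) : List (List Int) :=
  let primes := pvPrimes n
  let result := goB n (n.toNat + 1) 0 primes []
  PySem.List.sorted result (fun x => PySem.List.sorted x (fun y => y))

-- ===== PRECONDITION & SPEC =====
def Spec_back_prime_nr_sum_i (n : Int) (out : List (List Int)) : Prop := out = back_prime_nr_sum_i_alt n
instance (n : Int) (out : List (List Int)) : Decidable (Spec_back_prime_nr_sum_i n out) := by unfold Spec_back_prime_nr_sum_i; infer_instance

-- ===== CLAIM (what is proved, stated in full; the proofs are below) =====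
def Claim_equal_back_prime_nr_sum_i : Prop := ∀ (n : Int), Dom_back_prime_nr_sum_i n → Spec_back_prime_nr_sum_i n (back_prime_nr_sum_i n)

-- ===== LEMMAS AND PROOFS =====

-- lexicographic comparison of lists sharing a prefix
theorem pvLexPrefix (f : List Int) (p q : Int) (x' y' : List Int) (h : p < q) :
    (f ++ p :: x') < (f ++ q :: y') := by
  induction f with
  | nil => exact List.cons_lt_cons_iff.mpr (Or.inl h)
  | cons a t ih => exact List.cons_lt_cons_iff.mpr (Or.inr ⟨rfl, ih⟩)

theorem pvPrimes_two_le {n p : Int} (hp : p ∈ pvPrimes n) : 2 ≤ p := by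
  have := List.mem_of_mem_filter hp
  exact (PySem.List.mem_pyRange_one.mp this).1

theorem pvPrimes_pairwise (n : Int) : (pvPrimes n).Pairwise (· < ·) :=
  List.Pairwise.filter _ (PySem.List.pairwise_lt_pyRange_one 2 (n + 1))

theorem pvGetD_primes_nonneg (n : Int) (i : Int) :
    0 ≤ PySem.List.pyGetD (pvPrimes n) i 0 := by
  unfold PySem.List.pyGetD
  cases h : PySem.List.pyGet? (pvPrimes n) i with
  | none => simp
  | some p =>
    have h2 := pvPrimes_two_le (PySem.List.mem_of_pyGet?_eq_some _ h)
    simpa using by omega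

-- goB does not depend on the fuel once the fuel exceeds (n - total).toNat
theorem goB_fuel_congr (n : Int) : ∀ f1 : Nat, ∀ (f2 : Nat) (total : Int)
    (avail factors : List Int), (∀ p ∈ avail, 2 ≤ p) →
    (n - total).toNat < f1 → (n - total).toNat < f2 →
    goB n f1 total avail factors = goB n f2 total avail factors := by
  intro f1
  induction f1 with
  | zero => intro f2 total avail factors _ h1 _; omega
  | succ a iha =>
    intro f2 total avail factors h2 h1 hf2
    cases f2 with
    | zero => omega
    | succ b =>
      rw [goB, goB]
      by_cases ht : total = n
      · simp [ht]
      · simp only [ht, if_false]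
        induction avail with
        | nil => rw [goLoop, goLoop]
        | cons p rest ihr =>
          rw [goLoop, goLoop]
          by_cases hg : n < total + p
          · simp [hg]
          · simp only [hg, if_false]
            have hp2 : 2 ≤ p := h2 p (by simp)
            have hrec : goB n a (total + p) (p :: rest) (factors ++ [p]) =
                goB n b (total + p) (p :: rest) (factors ++ [p]) :=
              iha b (total + p) (p :: rest) (factors ++ [p]) h2 (by omega) (by omega)
            rw [hrec, ihr (fun q hq => h2 q (by simp [hq]))]

-- the same invariant for the inner loop, one suffix of the prime list at a time
theorem goLoop_invariant (n : Int) (fuel : Nat)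
    (hB : ∀ (total : Int) (kN : Nat) (factors : List Int),
      factors.Pairwise (· ≤ ·) →
      (∀ a ∈ factors, ∀ p ∈ (pvPrimes n).drop kN, a ≤ p) →
      (∀ x ∈ goB n fuel total ((pvPrimes n).drop kN) factors,
          factors <+: x ∧ x.Pairwise (· ≤ ·)) ∧
      (goB n fuel total ((pvPrimes n).drop kN) factors).Pairwise (· < ·)) :
    ∀ d kN : Nat, (pvPrimes n).length - kN = d → ∀ (total : Int) (factors : List Int),
    factors.Pairwise (· ≤ ·) →
    (∀ a ∈ factors, ∀ p ∈ (pvPrimes n).drop kN, a ≤ p) →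
    (∀ x ∈ goLoop n fuel total ((pvPrimes n).drop kN) factors,
        x.Pairwise (· ≤ ·) ∧ ∃ q ∈ (pvPrimes n).drop kN, (factors ++ [q]) <+: x) ∧
    (goLoop n fuel total ((pvPrimes n).drop kN) factors).Pairwise (· < ·) := by
  intro d
  induction d with
  | zero =>
    intro kN hd total factors hfac hcross
    have hk : (pvPrimes n).length ≤ kN := by omega
    rw [List.drop_eq_nil_of_le hk, goLoop]
    simp
  | succ d ih =>
    intro kN hd total factors hfac hcross
    have hkl : kN < (pvPrimes n).length := by omega
    have hdrop : (pvPrimes n).drop kN = (pvPrimes n)[kN] :: (pvPrimes n).drop (kN + 1) :=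
      List.drop_eq_getElem_cons hkl
    set p := (pvPrimes n)[kN] with hp
    have hpmem : p ∈ (pvPrimes n).drop kN := by rw [hdrop]; exact List.mem_cons_self
    have hpl : ∀ q ∈ (pvPrimes n).drop (kN + 1), p < q := by
      have hpw := ((pvPrimes_pairwise n).drop (i := kN))
      rw [hdrop] at hpw
      exact (List.pairwise_cons.mp hpw).1
    rw [hdrop, goLoop]
    by_cases hg : n < total + p
    · simp [hg]
    · simp only [hg, if_false]
      -- child call: its avail is again drop kN
      have hfac' : (factors ++ [p]).Pairwise (· ≤ ·) :=
        List.pairwise_append.mpr ⟨hfac, by simp,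
          by intro a ha b hb; simp only [List.mem_singleton] at hb; subst hb
             exact hcross a ha p hpmem⟩
      have hcross' : ∀ a ∈ factors ++ [p], ∀ q ∈ (pvPrimes n).drop kN, a ≤ q := by
        intro a ha q hq
        rcases List.mem_append.mp ha with ha | ha
        · exact hcross a ha q hq
        · simp only [List.mem_singleton] at ha; subst ha
          rw [hdrop] at hq
          rcases List.mem_cons.mp hq with rfl | hq
          · exact le_refl _
          · exact le_of_lt (hpl q hq)
      have hchild := hB (total + p) kN (factors ++ [p]) hfac' hcross'
      rw [hdrop] at hchild
      have hrest := ih (kN + 1) (by omega) total factors hfac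
        (fun a ha q hq => hcross a ha q (by rw [hdrop]; exact List.mem_cons_of_mem _ hq))
      constructor
      · intro x hx
        rcases List.mem_append.mp hx with hx | hx
        · obtain ⟨hpre, hpw⟩ := hchild.1 x hx
          exact ⟨hpw, p, List.mem_cons_self, hpre⟩
        · obtain ⟨hpw, q, hq, hpre⟩ := hrest.1 x hx
          exact ⟨hpw, q, List.mem_cons_of_mem _ hq, hpre⟩
      · refine List.pairwise_append.mpr ⟨hchild.2, hrest.2, ?_⟩
        intro x hx y hy
        obtain ⟨hprex, _⟩ := hchild.1 x hx
        obtain ⟨_, q, hq, hprey⟩ := hrest.1 y hy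
        obtain ⟨x', rfl⟩ := hprex
        obtain ⟨y', rfl⟩ := hprey
        rw [List.append_assoc, List.append_assoc]
        exact pvLexPrefix factors p q x' y' (hpl q hq)

-- every output of goB extends factors, is nondecreasing, and outputs are strictly
-- lexicographically increasing
theorem goB_invariant (n : Int) : ∀ fuel : Nat, ∀ (total : Int) (kN : Nat) (factors : List Int),
    factors.Pairwise (· ≤ ·) →
    (∀ a ∈ factors, ∀ p ∈ (pvPrimes n).drop kN, a ≤ p) →
    (∀ x ∈ goB n fuel total ((pvPrimes n).drop kN) factors,
        factors <+: x ∧ x.Pairwise (· ≤ ·)) ∧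
    (goB n fuel total ((pvPrimes n).drop kN) factors).Pairwise (· < ·) := by
  intro fuel
  induction fuel with
  | zero => intro total kN factors _ _; rw [goB]; simp
  | succ f ihf =>
    intro total kN factors hfac hcross
    rw [goB]
    by_cases ht : total = n
    · rw [if_pos ht]
      constructor
      · intro x hx
        simp only [List.mem_singleton] at hx
        subst hx
        exact ⟨List.prefix_refl _, hfac⟩
      · simp
    · rw [if_neg ht]
      have h := goLoop_invariant n f ihf ((pvPrimes n).length - kN) kN rfl total factors hfac hcross
      refine ⟨?_, h.2⟩
      intro x hx
      obtain ⟨hpw, q, _, hpre⟩ := h.1 x hx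
      exact ⟨(List.prefix_append factors [q]).trans hpre, hpw⟩

-- weights: the termination / fuel measure of A's stack machine
def pvW (n : Int) (K : Nat) (t : Int) : Nat := K ^ (n - t).toNat
def pvWsum (n : Int) (K : Nat) (stack : List (Int × List Int × Int)) : Nat :=
  (stack.map (fun c => pvW n K c.1)).sum

theorem pvWsum_append (n : Int) (K : Nat) (a b : List (Int × List Int × Int)) :
    pvWsum n K (a ++ b) = pvWsum n K a + pvWsum n K b := by
  simp [pvWsum]

theorem pushA_append (n : Int) (primes : List Int) (total : Int) (factors : List Int) :
    ∀ (is : List Int) (st : List (Int × List Int × Int)),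
    pushA n primes total factors is st = st ++ pushA n primes total factors is [] := by
  intro is
  induction is with
  | nil => intro st; simp [pushA]
  | cons i rest ih =>
    intro st
    simp only [pushA]
    by_cases hg : n < total + PySem.List.pyGetD primes i 0
    · simp [hg]
    · simp only [hg, if_false]
      rw [ih, ih ([] ++ _)]
      simp

theorem pushA_mem (n : Int) (total : Int) (factors : List Int) (ht : 0 ≤ total) :
    ∀ (is : List Int), (∀ i ∈ is, 0 ≤ i) →
    ∀ c ∈ pushA n (pvPrimes n) total factors is [], 0 ≤ c.1 ∧ 0 ≤ c.2.2 := by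
  intro is
  induction is with
  | nil => intro _ c hc; simp [pushA] at hc
  | cons i rest ih =>
    intro his c hc
    simp only [pushA] at hc
    by_cases hg : n < total + PySem.List.pyGetD (pvPrimes n) i 0
    · rw [if_pos hg] at hc; simp at hc
    · rw [if_neg hg, List.nil_append, pushA_append] at hc
      rcases List.mem_append.mp hc with hc | hc
      · simp only [List.mem_singleton] at hc
        subst hc
        refine ⟨?_, his i (by simp)⟩
        have := pvGetD_primes_nonneg n i
        simp only []
        omega
      · exact ih (fun j hj => his j (by simp [hj])) c hc

theorem pushA_wsum_mul (n : Int) (total : Int) (factors : List Int) :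
    ∀ is : List Int, (∀ i ∈ is, 0 ≤ i ∧ i < ((pvPrimes n).length : Int)) →
    pvWsum n ((pvPrimes n).length + 1) (pushA n (pvPrimes n) total factors is []) ≤
      is.length * ((pvPrimes n).length + 1) ^ ((n - total).toNat - 2) := by
  intro is
  induction is with
  | nil => intro _; simp [pushA, pvWsum]
  | cons i rest ih =>
    intro his
    simp only [pushA]
    by_cases hg : n < total + PySem.List.pyGetD (pvPrimes n) i 0
    · rw [if_pos hg]; simp [pvWsum]
    · rw [if_neg hg, List.nil_append, pushA_append]
      obtain ⟨hi0, hil⟩ := his i (by simp)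
      have hpel : PySem.List.pyGetD (pvPrimes n) i 0 = (pvPrimes n)[i.toNat] :=
        PySem.List.pyGetD_eq_getElem _ _ hi0 hil
      have hp2 : 2 ≤ PySem.List.pyGetD (pvPrimes n) i 0 := by
        rw [hpel]; exact pvPrimes_two_le (List.getElem_mem _)
      rw [pvWsum_append]
      have h1 : pvW n ((pvPrimes n).length + 1) (total + PySem.List.pyGetD (pvPrimes n) i 0) ≤
          ((pvPrimes n).length + 1) ^ ((n - total).toNat - 2) := by
        unfold pvW
        exact Nat.pow_le_pow_right (by omega) (by omega)
      have h2 := ih (fun j hj => his j (by simp [hj]))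
      have hw : pvWsum n ((pvPrimes n).length + 1)
          [(total + PySem.List.pyGetD (pvPrimes n) i 0,
            factors ++ [PySem.List.pyGetD (pvPrimes n) i 0], i)] =
          pvW n ((pvPrimes n).length + 1) (total + PySem.List.pyGetD (pvPrimes n) i 0) := by
        simp [pvWsum]
      rw [hw]
      have : (i :: rest).length * ((pvPrimes n).length + 1) ^ ((n - total).toNat - 2) =
          rest.length * ((pvPrimes n).length + 1) ^ ((n - total).toNat - 2) +
          ((pvPrimes n).length + 1) ^ ((n - total).toNat - 2) := by
        simp [List.length_cons, Nat.succ_mul]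
      omega

theorem pushA_wsum (n : Int) (total : Int) (factors : List Int) :
    ∀ is : List Int, (∀ i ∈ is, 0 ≤ i ∧ i < ((pvPrimes n).length : Int)) →
    is.length ≤ (pvPrimes n).length →
    pvWsum n ((pvPrimes n).length + 1) (pushA n (pvPrimes n) total factors is []) + 1 ≤
      ((pvPrimes n).length + 1) ^ (n - total).toNat := by
  intro is his hlen
  have hK1 : 1 ≤ ((pvPrimes n).length + 1) ^ (n - total).toNat :=
    Nat.one_le_pow _ _ (by omega)
  cases is with
  | nil => simpa [pushA, pvWsum] using hK1
  | cons i rest =>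
    simp only [pushA]
    by_cases hg : n < total + PySem.List.pyGetD (pvPrimes n) i 0
    · rw [if_pos hg]; simpa [pvWsum] using hK1
    · rw [if_neg hg, List.nil_append, pushA_append]
      obtain ⟨hi0, hil⟩ := his i (by simp)
      have hpel : PySem.List.pyGetD (pvPrimes n) i 0 = (pvPrimes n)[i.toNat] :=
        PySem.List.pyGetD_eq_getElem _ _ hi0 hil
      have hp2 : 2 ≤ PySem.List.pyGetD (pvPrimes n) i 0 := by
        rw [hpel]; exact pvPrimes_two_le (List.getElem_mem _)
      have he2 : 2 ≤ (n - total).toNat := by omega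
      set L := (pvPrimes n).length with hL
      set X := (L + 1) ^ ((n - total).toNat - 2) with hX
      have hX1 : 1 ≤ X := Nat.one_le_pow _ _ (by omega)
      have hpow : (L + 1) ^ (n - total).toNat = X * (L + 1) * (L + 1) := by
        rw [hX, ← pow_succ, ← pow_succ]
        congr 1
        omega
      rw [pvWsum_append]
      have h1 : pvW n (L + 1) (total + PySem.List.pyGetD (pvPrimes n) i 0) ≤ X := by
        rw [hX]
        unfold pvW
        exact Nat.pow_le_pow_right (by omega) (by omega)
      have h2 : pvWsum n (L + 1) (pushA n (pvPrimes n) total factors rest []) ≤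
          rest.length * X :=
        pushA_wsum_mul n total factors rest (fun j hj => his j (by simp [hj]))
      have hrl : rest.length + 1 ≤ L := by simpa using hlen
      have hw : pvWsum n (L + 1)
          [(total + PySem.List.pyGetD (pvPrimes n) i 0,
            factors ++ [PySem.List.pyGetD (pvPrimes n) i 0], i)] =
          pvW n (L + 1) (total + PySem.List.pyGetD (pvPrimes n) i 0) := by
        simp [pvWsum]
      rw [hw, hpow]
      have h3 : (rest.length + 1) * X ≤ L * X := by gcongr
      nlinarith [hX1, h1, h2, h3]

-- the children A pushes for a node expand, node by node, into B's inner loop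
theorem pushA_flatMap (n : Int) : ∀ d kN : Nat, ∀ (t : Int) (f : List Int) (fl : Nat),
    (pvPrimes n).length - kN = d → 0 ≤ t → t ≠ n → (n - t).toNat ≤ fl →
    List.flatMap (fun c => goB n (n.toNat + 2) c.1 ((pvPrimes n).drop c.2.2.toNat) c.2.1)
      (pushA n (pvPrimes n) t f
        (PySem.List.pyRange (kN : Int) ((pvPrimes n).length : Int)) [])
      = goLoop n fl t ((pvPrimes n).drop kN) f := by
  intro d
  induction d with
  | zero =>
    intro kN t f fl hd ht0 htn hfl
    have hk : (pvPrimes n).length ≤ kN := by omega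
    have h1 : PySem.List.pyRange (kN : Int) ((pvPrimes n).length : Int) = [] :=
      PySem.List.pyRange_one_eq_nil (by exact_mod_cast hk)
    rw [h1, List.drop_eq_nil_of_le hk, goLoop]
    simp [pushA]
  | succ d ih =>
    intro kN t f fl hd ht0 htn hfl
    have hkl : kN < (pvPrimes n).length := by omega
    have hcons : PySem.List.pyRange (kN : Int) ((pvPrimes n).length : Int) =
        (kN : Int) :: PySem.List.pyRange ((kN : Int) + 1) ((pvPrimes n).length : Int) :=
      PySem.List.pyRange_one_cons (by exact_mod_cast hkl)
    have hdrop : (pvPrimes n).drop kN = (pvPrimes n)[kN] :: (pvPrimes n).drop (kN + 1) :=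
      List.drop_eq_getElem_cons hkl
    have hpel : PySem.List.pyGetD (pvPrimes n) (kN : Int) 0 = (pvPrimes n)[kN] := by
      have h := PySem.List.pyGetD_eq_getElem (pvPrimes n) (i := (kN : Int)) 0
        (by positivity) (by exact_mod_cast hkl)
      simpa using h
    have hp2 : 2 ≤ (pvPrimes n)[kN] := pvPrimes_two_le (List.getElem_mem _)
    rw [hcons, hdrop, goLoop]
    simp only [pushA, hpel]
    by_cases hg : n < t + (pvPrimes n)[kN]
    · rw [if_pos hg, if_pos hg]
      simp
    · rw [if_neg hg, if_neg hg, List.nil_append, pushA_append, List.flatMap_append]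
      congr 1
      · simp only [List.flatMap_cons, List.flatMap_nil, List.append_nil, Int.toNat_natCast]
        rw [hdrop]
        refine goB_fuel_congr n (n.toNat + 2) fl (t + (pvPrimes n)[kN])
          ((pvPrimes n)[kN] :: (pvPrimes n).drop (kN + 1)) (f ++ [(pvPrimes n)[kN]])
          ?_ ?_ ?_
        · intro q hq
          rw [← hdrop] at hq
          exact pvPrimes_two_le (List.mem_of_mem_drop hq)
        · omega
        · omega
      · have h := ih (kN + 1) t f fl (by omega) ht0 htn hfl
        have hc : ((kN : Int) + 1) = ((kN + 1 : Nat) : Int) := by push_cast; ring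
        rw [hc]
        exact h

-- the characterisation of A's whole stack loop
theorem loopA_spec (n : Int) : ∀ fuel : Nat, ∀ (stack : List (Int × List Int × Int))
    (res : List (List Int)),
    (∀ c ∈ stack, 0 ≤ c.1 ∧ 0 ≤ c.2.2) →
    pvWsum n ((pvPrimes n).length + 1) stack ≤ fuel →
    loopA n (pvPrimes n) fuel stack res =
      res ++ (stack.flatMap
        (fun c => goB n (n.toNat + 2) c.1 ((pvPrimes n).drop c.2.2.toNat) c.2.1)).reverse := by
  intro fuel
  induction fuel with
  | zero =>
    intro stack res hv hw
    have hnil : stack = [] := by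
      cases stack with
      | nil => rfl
      | cons c st =>
        exfalso
        have h1 : 1 ≤ pvW n ((pvPrimes n).length + 1) c.1 := Nat.one_le_pow _ _ (by omega)
        simp only [pvWsum, List.map_cons, List.sum_cons] at hw
        omega
    subst hnil
    simp [loopA]
  | succ fuel ihf =>
    intro stack res hv hw
    rcases List.eq_nil_or_concat stack with rfl | ⟨st, x, rfl⟩
    · simp [loopA]
    · obtain ⟨total, factors, start⟩ := x
      simp only [List.concat_eq_append] at hv hw ⊢
      rw [loopA]
      simp only [List.getLast?_concat, List.dropLast_concat]
      have hvx := hv (total, factors, start) (by simp)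
      have hv' : ∀ c ∈ st, 0 ≤ c.1 ∧ 0 ≤ c.2.2 := fun c hc => hv c (by simp [hc])
      have hwapp : pvWsum n ((pvPrimes n).length + 1) (st ++ [(total, factors, start)]) =
          pvWsum n ((pvPrimes n).length + 1) st +
            pvW n ((pvPrimes n).length + 1) total := by
        rw [pvWsum_append]; simp [pvWsum]
      have hw1 : 1 ≤ pvW n ((pvPrimes n).length + 1) total := Nat.one_le_pow _ _ (by omega)
      by_cases ht : total = n
      · rw [if_pos ht]
        rw [ihf st (res ++ [factors]) hv' (by rw [hwapp] at hw; omega)]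
        have hFx : goB n (n.toNat + 2) total ((pvPrimes n).drop start.toNat) factors
            = [factors] := by
          rw [show n.toNat + 2 = (n.toNat + 1) + 1 from rfl, goB, if_pos ht]
        rw [List.flatMap_append]
        simp [hFx]
      · rw [if_neg ht]
        rw [pushA_append]
        have ht0 : 0 ≤ total := hvx.1
        have hs0 : 0 ≤ start := hvx.2
        have his : ∀ i ∈ PySem.List.pyRange start ((pvPrimes n).length : Int),
            0 ≤ i ∧ i < ((pvPrimes n).length : Int) := by
          intro i hi
          have := PySem.List.mem_pyRange_one.mp hi
          exact ⟨by omega, this.2⟩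
        have hchild := pushA_wsum n total factors
          (PySem.List.pyRange start ((pvPrimes n).length : Int)) his
          (by rw [PySem.List.length_pyRange_one]; omega)
        have hWe : pvW n ((pvPrimes n).length + 1) total =
            ((pvPrimes n).length + 1) ^ (n - total).toNat := rfl
        rw [ihf (st ++ pushA n (pvPrimes n) total factors
              (PySem.List.pyRange start ((pvPrimes n).length : Int)) []) res
            (by intro c hc
                rcases List.mem_append.mp hc with hc | hc
                · exact hv' c hc
                · exact pushA_mem n total factors ht0 _
                    (fun i hi => (his i hi).1) c hc)
            (by rw [pvWsum_append]
                rw [hwapp, hWe] at hw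
                omega)]
        rw [List.flatMap_append, List.flatMap_append]
        congr 2
        have hst : ((start.toNat : Int)) = start := by omega
        have hFx : goB n (n.toNat + 2) total ((pvPrimes n).drop start.toNat) factors
            = goLoop n (n.toNat + 1) total ((pvPrimes n).drop start.toNat) factors := by
          rw [show n.toNat + 2 = (n.toNat + 1) + 1 from rfl, goB, if_neg ht]
        have hfm := pushA_flatMap n ((pvPrimes n).length - start.toNat) start.toNat
          total factors (n.toNat + 1) rfl hvx.1 ht (by omega)
        rw [hst] at hfm
        simp [hfm, hFx]

-- the two LT/Decidable instance presentations of the lexicographic order on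
-- List Int give the same sort
theorem pvSortedInstCongr (xs : List (List Int)) (key : List Int → List Int) :
    @PySem.List.sorted (List Int) (List Int) List.instLT (fun a b => a.decidableLT b) xs key false =
    @PySem.List.sorted (List Int) (List Int) List.instLinearOrder.toLT
      (fun a b => LinearOrder.toDecidableLT a b) xs key false := by
  rw [@PySem.List.sorted_eq_foldl_insertBy, @PySem.List.sorted_eq_foldl_insertBy]
  congr 1
  funext acc x
  congr 1
  funext a b
  exact decide_eq_decide.mpr Iff.rfl

-- ===== VERDICT (by name: the statement is the Claim_ definition above) =====
theorem back_prime_nr_sum_i_spec : Claim_equal_back_prime_nr_sum_i := by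
  intro n _
  unfold Spec_back_prime_nr_sum_i
  show PySem.List.sorted
      (loopA n (pvPrimes n) (((pvPrimes n).length + 1) ^ n.toNat) [(0, [], 0)] [])
      (fun x => PySem.List.sorted x (fun y => y)) =
    PySem.List.sorted (goB n (n.toNat + 1) 0 (pvPrimes n) [])
      (fun x => PySem.List.sorted x (fun y => y))
  have hloop := loopA_spec n (((pvPrimes n).length + 1) ^ n.toNat) [(0, [], 0)] []
    (by simp) (by simp [pvWsum, pvW])
  have hsingle : (([((0 : Int), ([] : List Int), (0 : Int))]).flatMap
      (fun c => goB n (n.toNat + 2) c.1 ((pvPrimes n).drop c.2.2.toNat) c.2.1)) =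
      goB n (n.toNat + 2) 0 (pvPrimes n) [] := by
    simp
  have halt : goB n (n.toNat + 1) 0 (pvPrimes n) [] = goB n (n.toNat + 2) 0 (pvPrimes n) [] :=
    goB_fuel_congr n (n.toNat + 1) (n.toNat + 2) 0 (pvPrimes n) []
      (fun p hp => pvPrimes_two_le hp) (by omega) (by omega)
  have hinv := goB_invariant n (n.toNat + 2) 0 0 [] (by simp) (by simp)
  rw [List.drop_zero] at hinv
  have hkey : ∀ x ∈ goB n (n.toNat + 2) 0 (pvPrimes n) [],
      PySem.List.sorted x (fun y => y) = x := fun x hx =>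
    PySem.List.sorted_eq_self_of_pairwise x _ ((hinv.1 x hx).2)
  have hlt : (goB n (n.toNat + 2) 0 (pvPrimes n) []).Pairwise
      (fun a b => PySem.List.sorted a (fun y => y) < PySem.List.sorted b (fun y => y)) :=
    List.Pairwise.imp_of_mem
      (fun {a b} ha hb hab => by rw [hkey a ha, hkey b hb]; exact hab) hinv.2
  rw [hloop, List.nil_append, hsingle, halt, pvSortedInstCongr, pvSortedInstCongr]
  exact (PySem.List.sorted_eq_of_perm_of_pairwise_lt _ _ _
      ((List.reverse_perm _).symm) hlt).trans
    (PySem.List.sorted_eq_of_perm_of_pairwise_lt _ _ _ (List.Perm.refl _) hlt).symm
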